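-- pv_equiv track=rewrite | github.com/vfrico/kge-server | dataset.py | build_levels
-- ===== SOURCE A (Python) =====
-- def build_levels(n_levels):
--     """Generates a simple *chain* of triplets for the desired levels
--
--     :param int n_levels: Deep of the search on wikidata graph
--     :return: A list of chained triplets
--     :rtype: list
--     """
--
--     ob1 = "wikidata"
--     pre = "predicate"
--     ob2 = "object"
--     pre_base = pre
--     obj_base = ob2
--     predicateCount = 1
--     objectCount = 1
--
--     tripletas = []
--
--     for level in range(1, n_levels+1):
--         tripletas.append((ob1, pre, ob2))
--         objectCount += 1
--         predicateCount += 1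
--         ob1 = ob2
--         ob2 = obj_base + str(objectCount)
--         pre = pre_base + str(predicateCount)
--
--     return tripletas
-- ===== SOURCE B (Python) =====
-- def build_levels(n_levels):
--     """Generates a simple *chain* of triplets for the desired levels
--
--     :param int n_levels: Deep of the search on wikidata graph
--     :return: A list of chained triplets
--     :rtype: list
--     """
--     nodes = ["wikidata", "object"] + ["object" + str(i) for i in range(2, n_levels + 1)]
--     pres = ["predicate"] + ["predicate" + str(i) for i in range(2, n_levels + 1)]
--     return [(nodes[k], pres[k], nodes[k + 1]) for k in range(n_levels)]
-- ===== Notes on version B (the rewrite author's own statement) =====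
-- stated objective: simpler
-- what changed: Replaced the stateful loop that mutates ob1/ob2/pre and two counters with a declarative form: build the node and predicate name sequences directly from their indices and pair adjacent nodes with predicates by a single index comprehension.
import Mathlib
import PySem

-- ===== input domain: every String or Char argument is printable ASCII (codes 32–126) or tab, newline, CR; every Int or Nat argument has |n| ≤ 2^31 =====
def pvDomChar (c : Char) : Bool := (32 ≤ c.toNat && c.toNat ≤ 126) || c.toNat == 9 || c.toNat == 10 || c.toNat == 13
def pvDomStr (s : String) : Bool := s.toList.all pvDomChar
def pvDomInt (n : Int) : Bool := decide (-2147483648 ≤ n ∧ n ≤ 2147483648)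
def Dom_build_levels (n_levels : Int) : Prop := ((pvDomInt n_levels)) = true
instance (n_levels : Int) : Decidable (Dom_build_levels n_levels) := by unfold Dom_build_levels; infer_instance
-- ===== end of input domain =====

-- B builds the node/predicate name sequences from their indices and pairs adjacent nodes,
-- replacing A's stateful loop (mutating ob1/ob2/pre and two counters); same values, simpler decomposition.

-- ===== PORT A =====
-- the body of A's for-loop over one `level`; state = (ob1, pre, ob2, objectCount, predicateCount, tripletas)
def buildStep (s : String × String × String × Int × Int × List (String × String × String)) (_level : Int) :
    String × String × String × Int × Int × List (String × String × String) :=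
  let (ob1, pre, ob2, objectCount, predicateCount, tripletas) := s
  let tripletas := tripletas ++ [(ob1, pre, ob2)]
  let objectCount := objectCount + 1
  let predicateCount := predicateCount + 1
  let ob1 := ob2
  let ob2 := "object" ++ PySem.Int.toStr objectCount
  let pre := "predicate" ++ PySem.Int.toStr predicateCount
  (ob1, pre, ob2, objectCount, predicateCount, tripletas)

def build_levels (n_levels : Int) : List (String × String × String) :=
  let st := (PySem.List.pyRange 1 (n_levels + 1) 1).foldl buildStep
    ("wikidata", "predicate", "object", 1, 1, [])
  st.2.2.2.2.2

-- ===== PORT B =====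
def build_levels_alt (n_levels : Int) : List (String × String × String) :=
  let nodes := ["wikidata", "object"] ++
    (PySem.List.pyRange 2 (n_levels + 1) 1).map (fun i => "object" ++ PySem.Int.toStr i)
  let pres := ["predicate"] ++
    (PySem.List.pyRange 2 (n_levels + 1) 1).map (fun i => "predicate" ++ PySem.Int.toStr i)
  (PySem.List.pyRange 0 n_levels 1).map (fun k =>
    (PySem.List.pyGetD nodes k "", PySem.List.pyGetD pres k "", PySem.List.pyGetD nodes (k + 1) ""))

-- ===== PRECONDITION & SPEC =====
def Spec_build_levels (n_levels : Int) (out : List (String × String × String)) : Prop := out = build_levels_alt n_levels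
instance (n_levels : Int) (out : List (String × String × String)) : Decidable (Spec_build_levels n_levels out) := by unfold Spec_build_levels; infer_instance

-- ===== CLAIM (what is proved, stated in full; the proofs are below) =====
def Claim_equal_build_levels : Prop := ∀ (n_levels : Int), Dom_build_levels n_levels → Spec_build_levels n_levels (build_levels n_levels)

-- ===== LEMMAS AND PROOFS =====

-- the k-th node / predicate name of the chain
def nd (k : Nat) : String :=
  if k = 0 then "wikidata" else if k = 1 then "object" else "object" ++ PySem.Int.toStr (k : Int)

def pd (k : Nat) : String :=
  if k = 0 then "predicate" else "predicate" ++ PySem.Int.toStr ((k : Int) + 1)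

theorem loopA (m : Nat) :
    (PySem.List.pyRange 1 ((m : Int) + 1) 1).foldl buildStep
      ("wikidata", "predicate", "object", 1, 1, []) =
    (nd m, pd m, nd (m + 1), (m : Int) + 1, (m : Int) + 1,
      (List.range m).map (fun k => (nd k, pd k, nd (k + 1)))) := by
  induction m with
  | zero =>
      rw [PySem.List.pyRange_one_eq_nil (by omega)]
      simp [nd, pd]
  | succ m ih =>
      have h1 : ((m + 1 : Nat) : Int) + 1 = ((m : Int) + 1) + 1 := by push_cast; ring
      rw [h1, PySem.List.pyRange_one_succ_right (by omega), List.foldl_append, ih]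
      simp only [List.foldl_cons, List.foldl_nil, buildStep]
      simp only [nd, pd, List.range_succ]
      norm_num

theorem nodesEq (m : Nat) (h : 1 ≤ m) :
    ("wikidata" :: "object" ::
      (PySem.List.pyRange 2 ((m : Int) + 1) 1).map (fun i => "object" ++ PySem.Int.toStr i))
    = (List.range (m + 1)).map nd := by
  induction m with
  | zero => omega
  | succ m ih =>
      rcases Nat.eq_zero_or_pos m with rfl | hm
      · rw [PySem.List.pyRange_one_eq_nil (by norm_num)]
        simp [nd, List.range_succ]
      · have h1 : ((m + 1 : Nat) : Int) + 1 = ((m : Int) + 1) + 1 := by push_cast; ring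
        rw [h1, PySem.List.pyRange_one_succ_right (by omega), List.map_append]
        rw [List.range_succ, List.map_append, ← ih hm]
        simp [nd]
        intro h0; exact absurd h0 (by omega)

theorem presEq (m : Nat) (h : 1 ≤ m) :
    ("predicate" ::
      (PySem.List.pyRange 2 ((m : Int) + 1) 1).map (fun i => "predicate" ++ PySem.Int.toStr i))
    = (List.range m).map pd := by
  induction m with
  | zero => omega
  | succ m ih =>
      rcases Nat.eq_zero_or_pos m with rfl | hm
      · rw [PySem.List.pyRange_one_eq_nil (by norm_num)]
        simp [pd]
      · have h1 : ((m + 1 : Nat) : Int) + 1 = ((m : Int) + 1) + 1 := by push_cast; ring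
        rw [h1, PySem.List.pyRange_one_succ_right (by omega), List.map_append]
        rw [List.range_succ, List.map_append, ← ih hm]
        simp [pd]
        intro h0; exact absurd h0 (by omega)

theorem altB (m : Nat) :
    build_levels_alt (m : Int) =
      (List.range m).map (fun k => (nd k, pd k, nd (k + 1))) := by
  rcases Nat.eq_zero_or_pos m with rfl | hm
  · simp [build_levels_alt]
  · dsimp only [build_levels_alt]
    simp only [List.cons_append, List.nil_append]
    rw [nodesEq m hm, presEq m hm, PySem.List.pyRange_zero_nat]
    rw [List.map_map]
    refine List.map_congr_left ?_
    intro k hk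
    have hk' : k < m := List.mem_range.mp hk
    simp only [Function.comp]
    rw [PySem.List.pyGetD_natCast, show ((k : Int) + 1) = ((k + 1 : Nat) : Int) by push_cast; ring,
      PySem.List.pyGetD_natCast, PySem.List.pyGetD_natCast]
    rw [List.getD_eq_getElem _ _ (by simp; omega), List.getD_eq_getElem _ _ (by simp; omega),
      List.getD_eq_getElem _ _ (by simp; omega)]
    simp [List.getElem_map]

-- ===== VERDICT (by name: the statement is the Claim_ definition above) =====
theorem build_levels_spec : Claim_equal_build_levels := by
  intro n _
  unfold Spec_build_levels
  rcases (by omega : 0 ≤ n ∨ n < 0) with h | h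
  · obtain ⟨m, rfl⟩ : ∃ m : Nat, n = (m : Int) := ⟨n.toNat, (Int.toNat_of_nonneg h).symm⟩
    rw [altB, build_levels]
    simp only [loopA]
  · have hA : PySem.List.pyRange 1 (n + 1) 1 = [] := PySem.List.pyRange_one_eq_nil (by omega)
    have hB : PySem.List.pyRange 0 n 1 = [] := PySem.List.pyRange_one_eq_nil (by omega)
    simp [build_levels, build_levels_alt, hA, hB]
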